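-- pv_equiv track=rewrite | github.com/izunori/algo_for_competition | algo_rolling_hash.py | rollingHash
-- ===== SOURCE A (Python) =====
-- def rollingHash(S, m, b=10**9+7, h=2**61-1):
--     A = list(map(ord,S))
--     temp = 0
--     for a in A[:m]:
--         temp = (temp * b + a) % h
--     res = [temp]
--     bm = pow(b,m,h)
--     for a, ma in zip(A[m:],A):
--         temp = (temp*b - ma*bm + a) % h
--         res.append(temp)
--     return res
-- ===== SOURCE B (Python) =====
-- def rollingHash(S, m, b=10**9+7, h=2**61-1):
--     # prefix hashes: P[j] = hash of S[:j]; window j is then P[j+m] - P[j]*b^m (mod h)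
--     n = len(S)
--     P = [0]
--     last = 0
--     for c in S:
--         last = (last * b + ord(c)) % h
--         P.append(last)
--     if m > n:
--         return [P[n]]
--     bm = pow(b, m, h)
--     return [(P[j + m] - P[j] * bm) % h for j in range(n - m + 1)]
-- ===== Notes on version B (the rewrite author's own statement) =====
-- stated objective: alternative
-- what changed: Replaces A's two sequential loops (seed fold over S[:m], then an incremental slide that subtracts the outgoing character) by a prefix-hash array P plus the closed-form window formula (P[j+m]-P[j]*b^m) % h evaluated independently for each window.
-- outside the precondition, e.g. on rollingHash('ab', -1, 3, 5): A returns [2, 0], B raises IndexError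
import Mathlib
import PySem

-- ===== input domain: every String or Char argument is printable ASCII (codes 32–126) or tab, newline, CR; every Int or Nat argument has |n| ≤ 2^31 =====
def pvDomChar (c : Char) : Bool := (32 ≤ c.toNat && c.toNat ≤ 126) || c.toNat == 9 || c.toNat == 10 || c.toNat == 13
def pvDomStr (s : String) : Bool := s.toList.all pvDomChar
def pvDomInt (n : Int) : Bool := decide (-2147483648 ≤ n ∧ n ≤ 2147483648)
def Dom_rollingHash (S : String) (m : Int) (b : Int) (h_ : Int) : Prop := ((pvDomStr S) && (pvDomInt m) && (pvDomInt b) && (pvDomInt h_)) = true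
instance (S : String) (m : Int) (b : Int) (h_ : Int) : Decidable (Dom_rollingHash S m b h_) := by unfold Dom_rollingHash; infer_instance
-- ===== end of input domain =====

-- B replaces A's incremental sliding loop by a prefix-hash array and the closed-form
-- window formula (P[j+m] - P[j]*b^m) % h (objective: alternative decomposition, same cost).

-- fast modular exponentiation: what CPython's pow(b, e, h) computes for e ≥ 0
-- (square-and-multiply, reducing with Python '%' at every step; exact for h ≠ 0, as Pre_ requires)
def pvPowMod (b : Int) (e : Nat) (h : Int) : Int :=
  if he : e = 0 then PySem.Int.mod 1 h
  else
    let half := pvPowMod b (e / 2) h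
    let sq := PySem.Int.mod (half * half) h
    if e % 2 = 1 then PySem.Int.mod (sq * b) h else sq
decreasing_by exact Nat.div_lt_self (Nat.pos_of_ne_zero he) (by omega)

-- ===== PORT A =====
def rollingHash (S : String) (m : Int) (b : Int) (h_ : Int) : List Int :=
  let A : List Int := S.toList.map (fun c => (c.toNat : Int))
  let temp := (PySem.List.slice A none (some m)).foldl
      (fun t a => PySem.Int.mod (t * b + a) h_) 0
  let res : List Int := [temp]
  -- pow(b, m, h): exact for 0 ≤ m (guaranteed by Pre_); for m < 0 Python computes a
  -- modular inverse or raises ValueError — those inputs are outside Pre_.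
  let bm := if m < 0 then 0 else pvPowMod b m.toNat h_
  let st := ((PySem.List.slice A (some m) none).zip A).foldl
      (fun (st : Int × List Int) (p : Int × Int) =>
        let t := PySem.Int.mod (st.1 * b - p.2 * bm + p.1) h_
        (t, st.2 ++ [t])) (temp, res)
  st.2

-- ===== PORT B =====
def rollingHash_alt (S : String) (m : Int) (b : Int) (h_ : Int) : List Int :=
  let n : Int := PySem.Str.len S
  let st := S.toList.foldl
      (fun (st : Int × List Int) (c : Char) =>
        let last := PySem.Int.mod (st.1 * b + (c.toNat : Int)) h_
        (last, st.2 ++ [last])) (0, [0])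
  let P := st.2
  if n < m then [PySem.List.pyGetD P n 0]
  else
    -- pow(b, m, h): exact for 0 ≤ m (Pre_); B's Python raises on m < 0 (outside Pre_)
    let bm := if m < 0 then 0 else pvPowMod b m.toNat h_
    (PySem.List.pyRange 0 (n - m + 1) 1).map
      (fun j => PySem.Int.mod (PySem.List.pyGetD P (j + m) 0
                  - PySem.List.pyGetD P j 0 * bm) h_)

-- ===== PRECONDITION & SPEC =====
-- Pre_ excludes h_ = 0 (Python '%' raises ZeroDivisionError) and the negative window
-- lengths m < 0, outside the natural domain: there A's pow(b, m, h) does modular-inverse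
-- arithmetic or raises ValueError, and B's own algorithm raises (IndexError/ValueError).
def Pre_rollingHash (S : String) (m : Int) (b : Int) (h_ : Int) : Prop :=
  0 ≤ m ∧ h_ ≠ 0
instance (S : String) (m : Int) (b : Int) (h_ : Int) : Decidable (Pre_rollingHash S m b h_) := by
  unfold Pre_rollingHash; infer_instance

def pvWitness_rollingHash : String × Int × Int × Int := ("abc", 2, 31, 97)

def Spec_rollingHash (S : String) (m : Int) (b : Int) (h_ : Int) (out : List Int) : Prop := out = rollingHash_alt S m b h_
instance (S : String) (m : Int) (b : Int) (h_ : Int) (out : List Int) : Decidable (Spec_rollingHash S m b h_ out) := by unfold Spec_rollingHash; infer_instance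

-- ===== CLAIM (what is proved, stated in full; the proofs are below) =====
def Claim_equal_rollingHash : Prop := ∀ (S : String) (m : Int) (b : Int) (h_ : Int), Dom_rollingHash S m b h_ → Pre_rollingHash S m b h_ → Spec_rollingHash S m b h_ (rollingHash S m b h_)

-- ===== LEMMAS AND PROOFS =====

-- Python '%' is Int.fmod
theorem pvmod_fmod (a b : Int) : PySem.Int.mod a b = Int.fmod a b := by
  simp [PySem.Int.mod, Int.fmod]

theorem pv_dvd_mod_sub (x h : Int) : h ∣ PySem.Int.mod x h - x := by
  rw [pvmod_fmod]
  exact ⟨-(Int.fdiv x h), by have h2 := Int.fmod_add_mul_fdiv x h; ring_nf; linarith⟩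

-- values congruent mod h have the same Python remainder
theorem pvmod_congr (x y h : Int) (hh : h ≠ 0) (hd : h ∣ x - y) :
    PySem.Int.mod x h = PySem.Int.mod y h := by
  have d1 := pv_dvd_mod_sub x h
  have d2 := pv_dvd_mod_sub y h
  have hd2 : h ∣ PySem.Int.mod x h - PySem.Int.mod y h := by
    have harr : PySem.Int.mod x h - PySem.Int.mod y h
        = (PySem.Int.mod x h - x) - (PySem.Int.mod y h - y) + (x - y) := by ring
    rw [harr]; exact dvd_add (dvd_sub d1 d2) hd
  obtain ⟨k, hk⟩ := hd2
  rcases lt_trichotomy h 0 with hneg | hz | hpos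
  · have b1 := PySem.Int.mod_neg_bounds x (b := h) hneg
    have b2 := PySem.Int.mod_neg_bounds y (b := h) hneg
    have hk0 : k = 0 := by
      by_contra hkne
      rcases lt_or_gt_of_ne hkne with hl | hg
      · nlinarith [hk, b1.1, b1.2, b2.1, b2.2]
      · nlinarith [hk, b1.1, b1.2, b2.1, b2.2]
    rw [hk0, mul_zero] at hk; linarith
  · exact absurd hz hh
  · have b1l := PySem.Int.mod_nonneg x (b := h) hpos
    have b1u := PySem.Int.mod_lt x (b := h) hpos
    have b2l := PySem.Int.mod_nonneg y (b := h) hpos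
    have b2u := PySem.Int.mod_lt y (b := h) hpos
    have hk0 : k = 0 := by
      by_contra hkne
      rcases lt_or_gt_of_ne hkne with hl | hg
      · nlinarith
      · nlinarith
    rw [hk0, mul_zero] at hk; linarith

theorem pvmod_mod (x h : Int) (hh : h ≠ 0) :
    PySem.Int.mod (PySem.Int.mod x h) h = PySem.Int.mod x h :=
  pvmod_congr _ _ _ hh (pv_dvd_mod_sub x h)

theorem pvmod_zero (h : Int) : PySem.Int.mod 0 h = 0 := by
  simp [pvmod_fmod]

-- prefix hash of a list of character codes
def pvPref (b h_ : Int) (l : List Int) : Int :=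
  l.foldl (fun t a => PySem.Int.mod (t * b + a) h_) 0

theorem pvPref_take_succ (b h_ : Int) (l : List Int) (k : Nat) (hk : k < l.length) :
    pvPref b h_ (l.take (k + 1))
      = PySem.Int.mod (pvPref b h_ (l.take k) * b + l[k]) h_ := by
  simp only [pvPref, List.take_add_one, List.getElem?_eq_getElem hk, Option.toList_some,
    List.foldl_append, List.foldl_cons, List.foldl_nil]

theorem pvmod_pvPref (b h_ : Int) (hh : h_ ≠ 0) (l : List Int) :
    PySem.Int.mod (pvPref b h_ l) h_ = pvPref b h_ l := by
  induction l using List.reverseRecOn with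
  | nil => simpa [pvPref] using pvmod_zero h_
  | append_singleton l a ih =>
      simp only [pvPref, List.foldl_append, List.foldl_cons, List.foldl_nil]
      exact pvmod_mod _ _ hh

-- generic "append the running value to the result list" loop shape shared by both ports
def pvScanG {α : Type} (g : Int → α → Int) : Int → List α → List Int
  | _, [] => []
  | t, x :: l => g t x :: pvScanG g (g t x) l

theorem pvFoldAcc {α : Type} (g : Int → α → Int) (l : List α) :
    ∀ (t : Int) (acc : List Int),
      l.foldl (fun (st : Int × List Int) x => (g st.1 x, st.2 ++ [g st.1 x])) (t, acc)
        = (l.foldl g t, acc ++ pvScanG g t l) := by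
  induction l with
  | nil => simp [pvScanG]
  | cons x l ih => intro t acc; simp [pvScanG, ih]

theorem pvScanG_eq_map {α : Type} (g : Int → α → Int) :
    ∀ (l : List α) (t : Int),
      pvScanG g t l = (List.range l.length).map (fun j => (l.take (j + 1)).foldl g t) := by
  intro l
  induction l with
  | nil => intro t; rfl
  | cons x l ih =>
      intro t
      simp [pvScanG, ih (g t x), List.range_succ_eq_map, List.map_map, Function.comp]

-- the closed-form window value B computes
def pvF (b h_ bm : Int) (cs : List Int) (m' j : Nat) : Int :=
  PySem.Int.mod (pvPref b h_ (cs.take (m' + j)) - pvPref b h_ (cs.take j) * bm) h_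

theorem pvF_step (b h_ bm : Int) (hh : h_ ≠ 0) (cs : List Int) (m' j : Nat)
    (h1 : m' + j < cs.length) :
    PySem.Int.mod (pvF b h_ bm cs m' j * b - cs[j]'(by omega) * bm + cs[m' + j]) h_
      = pvF b h_ bm cs m' (j + 1) := by
  have hj : j < cs.length := by omega
  unfold pvF
  apply pvmod_congr _ _ _ hh
  obtain ⟨k1, e1⟩ := pv_dvd_mod_sub
    (pvPref b h_ (cs.take (m' + j)) - pvPref b h_ (cs.take j) * bm) h_
  have hmj : m' + (j + 1) = (m' + j) + 1 := by omega
  rw [hmj, pvPref_take_succ b h_ cs (m' + j) h1, pvPref_take_succ b h_ cs j hj]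
  obtain ⟨k2, e2⟩ := pv_dvd_mod_sub (pvPref b h_ (cs.take (m' + j)) * b + cs[m' + j]) h_
  obtain ⟨k3, e3⟩ := pv_dvd_mod_sub (pvPref b h_ (cs.take j) * b + cs[j]) h_
  unfold pvF at *
  exact ⟨k1 * b - k2 + k3 * bm, by linear_combination b * e1 - e2 + bm * e3⟩

-- A's sliding loop, started at window j, produces exactly the closed-form values
theorem pvScanA_spec (b h_ bm : Int) (hh : h_ ≠ 0) (cs : List Int) (m' : Nat) :
    ∀ (k j : Nat), m' + j + k = cs.length →
      pvScanG (fun t (p : Int × Int) => PySem.Int.mod (t * b - p.2 * bm + p.1) h_)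
          (pvF b h_ bm cs m' j) ((cs.drop (m' + j)).zip (cs.drop j))
        = (List.range k).map (fun i => pvF b h_ bm cs m' (j + i + 1)) := by
  intro k
  induction k with
  | zero =>
      intro j hlen
      have hnil : cs.drop (m' + j) = [] := List.drop_eq_nil_of_le (by omega)
      simp [hnil, pvScanG]
  | succ k ih =>
      intro j hlen
      have h1 : m' + j < cs.length := by omega
      have hj : j < cs.length := by omega
      rw [List.drop_eq_getElem_cons h1, List.drop_eq_getElem_cons hj, List.zip_cons_cons]
      show (PySem.Int.mod (pvF b h_ bm cs m' j * b - cs[j] * bm + cs[m' + j]) h_)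
          :: pvScanG _ (PySem.Int.mod (pvF b h_ bm cs m' j * b - cs[j] * bm + cs[m' + j]) h_)
             ((cs.drop (m' + j + 1)).zip (cs.drop (j + 1))) = _
      rw [pvF_step b h_ bm hh cs m' j h1]
      have harg : m' + (j + 1) = m' + j + 1 := by omega
      have hrec := ih (j + 1) (by omega)
      rw [harg] at hrec
      rw [hrec]
      simp [List.range_succ_eq_map, List.map_map, Function.comp]
      intro a _; congr 1; omega

-- indexing a range-map list
theorem pvGetD_map_range (F : Nat → Int) (N : Nat) (i : Int) (h0 : 0 ≤ i) (hN : i.toNat < N) :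
    PySem.List.pyGetD ((List.range N).map F) i 0 = F i.toNat := by
  rw [PySem.List.pyGetD_eq_getElem _ _ h0 (by simpa using (by omega : i < (N : Int)))]
  simp

-- B's prefix array P is the range-map of prefix hashes
theorem pvP_eq (b h_ : Int) (chars : List Char) :
    (0 : Int) :: pvScanG (fun t c => PySem.Int.mod (t * b + (c.toNat : Int)) h_) 0 chars
      = (List.range (chars.length + 1)).map
          (fun j => pvPref b h_ ((chars.map (fun c => (c.toNat : Int))).take j)) := by
  rw [pvScanG_eq_map, List.range_succ_eq_map, List.map_cons, List.map_map]
  refine congrArg₂ List.cons rfl ?_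
  apply List.map_congr_left
  intro j hj
  simp only [Function.comp_apply]
  rw [← List.map_take, pvPref, List.foldl_map]

-- ===== VERDICT (by name: the statement is the Claim_ definition above) =====
theorem rollingHash_spec : Claim_equal_rollingHash := by
  intro S m b h_ _ hpre
  obtain ⟨hm, hh⟩ := hpre
  unfold Spec_rollingHash rollingHash rollingHash_alt
  simp only [PySem.Str.len_eq]
  set chars := S.toList with hchars
  set cs : List Int := chars.map (fun c => (c.toNat : Int)) with hcs
  set n : Nat := chars.length with hn
  have hcslen : cs.length = n := by rw [hcs, List.length_map, hn]
  have hnotlt : ¬ m < 0 := by omega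
  simp only [if_neg hnotlt]
  set bm : Int := pvPowMod b m.toNat h_ with hbm
  set m' : Nat := m.toNat with hm'
  -- A's seed: hash of S[:m]
  rw [PySem.List.slice_to cs hm, PySem.List.slice_from cs hm]
  simp only [← hm']
  -- A's loop via the generic accumulator shape
  rw [pvFoldAcc (fun t (p : Int × Int) => PySem.Int.mod (t * b - p.2 * bm + p.1) h_)]
  -- B's prefix array via the generic accumulator shape
  rw [pvFoldAcc (fun t (c : Char) => PySem.Int.mod (t * b + (c.toNat : Int)) h_)]
  have hpv : ∀ l : List Int,
      List.foldl (fun t a => PySem.Int.mod (t * b + a) h_) 0 l = pvPref b h_ l := fun _ => rfl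
  simp only [hpv]
  set F : Nat → Int := fun j => pvPref b h_ (cs.take j) with hF
  have hP : (0 : Int) :: pvScanG (fun t c => PySem.Int.mod (t * b + (c.toNat : Int)) h_) 0 chars
      = (List.range (n + 1)).map F := pvP_eq b h_ chars
  simp only [List.cons_append, List.nil_append] at hP ⊢
  rw [hP]
  by_cases hlt : (n : Int) < m
  · -- m > len(S): a single hash of the whole string
    rw [if_pos hlt]
    have hmn : n ≤ m' := by omega
    have htake : cs.take m' = cs := List.take_of_length_le (by omega)
    have hdrop : cs.drop m' = [] := List.drop_eq_nil_of_le (by omega)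
    rw [htake, hdrop]
    have hzip : ([] : List Int).zip cs = [] := rfl
    rw [hzip]
    have hscan : pvScanG (fun t (p : Int × Int) => PySem.Int.mod (t * b - p.2 * bm + p.1) h_)
        (pvPref b h_ cs) [] = [] := rfl
    rw [hscan]
    rw [pvGetD_map_range F (n + 1) n (by positivity) (by omega)]
    simp only [hF, Int.toNat_natCast]
    rw [List.take_of_length_le (by omega)]
  · -- m ≤ len(S): the window list
    rw [if_neg hlt]
    have hm'le : m' ≤ n := by omega
    -- A's seed is the closed form at j = 0
    have hseed : pvPref b h_ (cs.take m') = pvF b h_ bm cs m' 0 := by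
      unfold pvF
      simp only [Nat.add_zero, List.take_zero]
      rw [show pvPref b h_ ([] : List Int) = 0 from rfl, zero_mul, sub_zero,
        pvmod_pvPref b h_ hh]
    rw [hseed]
    -- A's loop = the closed-form windows 1 .. n-m'
    have hA := pvScanA_spec b h_ bm hh cs m' (n - m') 0 (by omega)
    simp only [Nat.add_zero, List.drop_zero, Nat.zero_add] at hA
    rw [hA]
    -- B's comprehension
    have hNat : ((n : Int) - m + 1) = ((n - m' + 1 : Nat) : Int) := by omega
    rw [hNat, PySem.List.pyRange_one, List.map_map]
    have hlen2 : (((n - m' + 1 : Nat) : Int) - 0).toNat = n - m' + 1 := by omega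
    rw [hlen2]
    -- turn B's side into a map of pvF over range (n - m' + 1)
    have hB : ∀ k ∈ List.range (n - m' + 1),
        ((fun j => PySem.Int.mod (PySem.List.pyGetD ((List.range (n + 1)).map F) (j + m) 0
            - PySem.List.pyGetD ((List.range (n + 1)).map F) j 0 * bm) h_) ∘
          (fun k : Nat => (0 : Int) + k)) k = pvF b h_ bm cs m' k := by
      intro k hk
      have hkb : k < n - m' + 1 := List.mem_range.mp hk
      simp only [Function.comp_apply, zero_add]
      have e1 : ((k : Int) + m) = ((k + m' : Nat) : Int) := by omega
      rw [e1, pvGetD_map_range F (n + 1) ((k + m' : Nat) : Int) (by positivity) (by omega),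
        pvGetD_map_range F (n + 1) (k : Int) (by positivity) (by omega)]
      simp only [Int.toNat_natCast, hF]
      unfold pvF
      rw [show m' + k = k + m' from by omega]
    rw [List.map_congr_left hB]
    -- finally: f 0 :: map (f ∘ succ) = map f over the extended range
    rw [List.range_succ_eq_map, List.map_cons, List.map_map]
    refine congrArg₂ List.cons rfl ?_
    apply List.map_congr_left
    intro i hi
    simp only [Function.comp_apply]
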